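-- pv_equiv track=rewrite | github.com/Copticoder/Algorithms-Data-Structures-Practices | Algrotihms and Data Strucures/Algorithms and data structures/UC San Diego assignments/Algorithmic tool box/some dynamic programming practice/sumTab.py | sunTab
-- ===== SOURCE A (Python) =====
-- def sunTab(n,numArray):
--     newArr=[False]*(n+1)
--     newArr[0]=True
--     for i in range(n):
--         for j in range(len(numArray)):
--             if newArr[i] != False:
--                 if i+numArray[j] < len(newArr):
--                     newArr[i+numArray[j]]=True
--             else:
--                 continue
--     return newArr
-- ===== SOURCE B (Python) =====
-- def sunTab(n, numArray):
--     # BFS-by-levels over reachable sums in [0, n], instead of A's dense left-to-right sweep.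
--     reach = {0}
--     frontier = [0]
--     for _ in range(n):
--         if not frontier:
--             break
--         nxt = []
--         for s in frontier:
--             for v in numArray:
--                 t = s + v
--                 if 0 <= t <= n and t not in reach:
--                     reach.add(t)
--                     nxt.append(t)
--         frontier = nxt
--     return [i in reach for i in range(n + 1)]
-- ===== Notes on version B (the rewrite author's own statement) =====
-- stated objective: alternative
-- what changed: Replaces A's dense left-to-right sweep over all n table indices by a BFS-style frontier expansion of the set of sums reachable from 0 within [0,n], stopping as soon as the closure is complete, then rendering the set as the boolean table.
-- intended difference: On inputs with n >= 1 and some value v in numArray with -n <= v <= -1, A writes through Python's negative-index wraparound (marking position i+v+n+1 from the start) and never expands sums discovered below its sweep position, while B marks exactly the sums reachable from 0 by steps staying inside [0,n], which is the intended reachability table. — e.g. on sunTab(1, [-1]): A returns [true, true], B returns [true, false]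
import Mathlib
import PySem

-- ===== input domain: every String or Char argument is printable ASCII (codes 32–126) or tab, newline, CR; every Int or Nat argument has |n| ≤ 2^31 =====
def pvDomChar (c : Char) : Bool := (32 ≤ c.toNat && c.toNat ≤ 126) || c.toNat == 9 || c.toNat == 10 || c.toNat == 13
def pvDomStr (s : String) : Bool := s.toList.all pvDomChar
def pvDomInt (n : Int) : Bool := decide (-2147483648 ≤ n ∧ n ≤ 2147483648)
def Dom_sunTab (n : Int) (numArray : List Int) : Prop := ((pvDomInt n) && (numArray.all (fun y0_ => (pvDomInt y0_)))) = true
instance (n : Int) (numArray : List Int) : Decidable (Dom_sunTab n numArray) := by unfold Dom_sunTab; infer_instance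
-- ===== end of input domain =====

-- B replaces A's dense left-to-right index sweep by a BFS-style frontier expansion over the
-- set of sums reachable from 0 within [0, n] (objective: alternative algorithm/data structure).

-- ===== PORT A =====
-- body of A's innermost statement block (reads newArr[i], writes newArr[i + numArray[j]]);
-- pySetD is exact here: under Pre_sunTab every written index satisfies -(len) ≤ idx < len,
-- so the Python IndexError case (= pySet? none, where pySetD falls back to the unchanged list) is excluded
def sunTabStep (i : Int) (newArr : List Bool) (v : Int) : List Bool :=
  if PySem.List.pyGetD newArr i false ≠ false then
    if i + v < PySem.List.len newArr then
      PySem.List.pySetD newArr (i + v) true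
    else newArr
  else newArr

def sunTab (n : Int) (numArray : List Int) : List Bool :=
  -- newArr = [False]*(n+1); newArr[0] = True (IndexError iff n < 0, excluded by Pre_sunTab)
  let newArr := PySem.List.pySetD (PySem.List.pyRepeat [false] (n + 1)) 0 true
  (PySem.List.pyRange 0 n 1).foldl (fun newArr i =>
    (PySem.List.pyRange 0 (PySem.List.len numArray) 1).foldl
      (fun newArr j => sunTabStep i newArr (PySem.List.pyGetD numArray j 0)) newArr) newArr

-- ===== PORT B =====
-- one candidate step of B's BFS: state = (reach, nxt)
def sunTabAltBody (n : Int) (st : PySem.Set Int × List Int) (s : Int) (v : Int) :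
    PySem.Set Int × List Int :=
  let t := s + v
  if 0 ≤ t ∧ t ≤ n ∧ PySem.Set.contains st.1 t = false then
    (PySem.Set.add st.1 t, st.2 ++ [t])
  else st

-- expand one frontier element s against all of numArray
def sunTabAltRound (n : Int) (numArray : List Int) (st : PySem.Set Int × List Int) (s : Int) :
    PySem.Set Int × List Int :=
  numArray.foldl (fun st v => sunTabAltBody n st s v) st

-- 'for _ in range(n): if not frontier: break; …' — at most n rounds, each expanding the frontier
def sunTabAltLoop (n : Int) (numArray : List Int) (fuel : Nat) (reach : PySem.Set Int)
    (frontier : List Int) : PySem.Set Int :=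
  match fuel with
  | 0 => reach
  | Nat.succ fuel =>
    if frontier = [] then reach
    else
      let st := frontier.foldl (sunTabAltRound n numArray) (reach, [])
      sunTabAltLoop n numArray fuel st.1 st.2

def sunTab_alt (n : Int) (numArray : List Int) : List Bool :=
  let reach := sunTabAltLoop n numArray n.toNat (PySem.Set.ofList [0]) [0]
  (PySem.List.pyRange 0 (n + 1) 1).map (fun i => PySem.Set.contains reach i)

-- ===== PRECONDITION & SPEC =====
-- Pre_ excludes exactly the inputs where A raises: n < 0 (assignment newArr[0]=True into an empty
-- list, IndexError) and, for n ≥ 1, a value v < -(n+1) (assignment newArr[i+v] below -len, IndexError).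
def Pre_sunTab (n : Int) (numArray : List Int) : Prop :=
  0 ≤ n ∧ (n = 0 ∨ ∀ v ∈ numArray, -(n + 1) ≤ v)
instance (n : Int) (numArray : List Int) : Decidable (Pre_sunTab n numArray) := by
  unfold Pre_sunTab; infer_instance
def pvWitness_sunTab : Int × List Int := (2, [1])

-- On inputs with n ≥ 1 and some v in numArray with -n ≤ v ≤ -1, A writes through Python's
-- negative-index wraparound (marking position i+v+n+1) and never revisits indices below its sweep
-- position, while B marks exactly the sums reachable from 0 by steps staying inside [0, n],
-- which is the intended reachability table.
def D_sunTab (n : Int) (numArray : List Int) : Prop :=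
  1 ≤ n ∧ ∃ v ∈ numArray, -n ≤ v ∧ v ≤ -1
instance (n : Int) (numArray : List Int) : Decidable (D_sunTab n numArray) := by
  unfold D_sunTab; infer_instance

def Spec_sunTab (n : Int) (numArray : List Int) (out : List Bool) : Prop :=
  ¬ D_sunTab n numArray → out = sunTab_alt n numArray
instance (n : Int) (numArray : List Int) (out : List Bool) : Decidable (Spec_sunTab n numArray out) := by
  unfold Spec_sunTab; infer_instance

def pvDiffWitness_sunTab : Int × List Int := (1, [-1])
def pvDiffWitnessOut_sunTab : (List Bool) × (List Bool) := ([true, true], [true, false])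

-- ===== CLAIM (what is proved, stated in full; the proofs are below) =====
def Claim_unchanged_sunTab : Prop := ∀ (n : Int) (numArray : List Int), Dom_sunTab n numArray → Pre_sunTab n numArray → Spec_sunTab n numArray (sunTab n numArray)
def Claim_changed_sunTab : Prop := Dom_sunTab (pvDiffWitness_sunTab.1) (pvDiffWitness_sunTab.2) ∧ Pre_sunTab (pvDiffWitness_sunTab.1) (pvDiffWitness_sunTab.2) ∧ D_sunTab (pvDiffWitness_sunTab.1) (pvDiffWitness_sunTab.2) ∧ sunTab (pvDiffWitness_sunTab.1) (pvDiffWitness_sunTab.2) = pvDiffWitnessOut_sunTab.1 ∧ sunTab_alt (pvDiffWitness_sunTab.1) (pvDiffWitness_sunTab.2) = pvDiffWitnessOut_sunTab.2 ∧ pvDiffWitnessOut_sunTab.1 ≠ pvDiffWitnessOut_sunTab.2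

-- ===== LEMMAS AND PROOFS =====

-- sums reachable from 0 by steps from arr that stay inside [0, n] (the common spec of both ports)
inductive BRReach (n : Int) (arr : List Int) : Int → Prop
  | zero : BRReach n arr 0
  | step (s v : Int) : BRReach n arr s → v ∈ arr → 0 ≤ s + v → s + v ≤ n → BRReach n arr (s + v)

-- reachability using only nonnegative steps, all intermediate sums < stage i (A's sweep invariant)
inductive RSReach (n : Int) (arr : List Int) (i : Int) : Int → Prop
  | zero : RSReach n arr i 0
  | step (s v : Int) : RSReach n arr i s → s < i → v ∈ arr → 0 ≤ v → s + v ≤ n →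
      RSReach n arr i (s + v)

theorem RSReach_nonneg (n : Int) (arr : List Int) (i s : Int) (h : RSReach n arr i s) : 0 ≤ s := by
  induction h with
  | zero => omega
  | step s v _ _ _ hv _ ih => omega

theorem RSReach_le (n : Int) (arr : List Int) (i s : Int) (h0 : 0 ≤ n) (h : RSReach n arr i s) :
    s ≤ n := by
  induction h with
  | zero => omega
  | step => omega

theorem RSReach_mono (n : Int) (arr : List Int) (i j s : Int) (hij : i ≤ j)
    (h : RSReach n arr i s) : RSReach n arr j s := by
  induction h with
  | zero => exact RSReach.zero
  | step s v _ hsi hv hv0 hle ih => exact RSReach.step s v ih (by omega) hv hv0 hle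

theorem RSReach_zero_iff (n : Int) (arr : List Int) (k : Int) :
    RSReach n arr 0 k ↔ k = 0 := by
  constructor
  · intro h
    cases h with
    | zero => rfl
    | step s v hs hsi => exact absurd (RSReach_nonneg n arr 0 s hs) (by omega)
  · rintro rfl; exact RSReach.zero

theorem RSReach_succ_iff (n : Int) (arr : List Int) (i k : Int) (h0 : 0 ≤ i) :
    RSReach n arr (i + 1) k ↔
      RSReach n arr i k ∨ (RSReach n arr i i ∧ ∃ v ∈ arr, 0 ≤ v ∧ k = i + v ∧ k ≤ n) := by
  constructor
  · intro h
    induction h with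
    | zero => exact Or.inl RSReach.zero
    | step s v hs hsi hv hv0 hle ih =>
      rcases ih with hsl | ⟨hii, v', hv', hv'0, hse, hsn⟩
      · by_cases hlt : s < i
        · exact Or.inl (RSReach.step s v hsl hlt hv hv0 hle)
        · have hsi' : s = i := by omega
          subst hsi'
          exact Or.inr ⟨hsl, v, hv, hv0, rfl, hle⟩
      · have hsi' : s = i := by omega
        subst hsi'
        exact Or.inr ⟨hii, v, hv, hv0, rfl, hle⟩
  · rintro (h | ⟨hii, v, hv, hv0, rfl, hle⟩)
    · exact RSReach_mono n arr i (i + 1) k (by omega) h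
    · exact RSReach.step i v (RSReach_mono n arr i (i + 1) i (by omega) hii) (by omega) hv hv0 hle

theorem BRReach_bounds (n : Int) (arr : List Int) (x : Int) (h0 : 0 ≤ n)
    (h : BRReach n arr x) : 0 ≤ x ∧ x ≤ n := by
  induction h with
  | zero => omega
  | step => omega

theorem BRReach_iff_RSReach (n : Int) (arr : List Int) (k : Int) (h0 : 0 ≤ n)
    (hv : ∀ v ∈ arr, 0 ≤ v ∨ v = -(n + 1)) :
    BRReach n arr k ↔ RSReach n arr n k := by
  constructor
  · intro h
    induction h with
    | zero => exact RSReach.zero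
    | step s v hs hvm hge hle ih =>
      have hsle : s ≤ n := RSReach_le n arr n s h0 ih
      have hv0 : 0 ≤ v := by
        rcases hv v hvm with h' | h'
        · exact h'
        · omega
      by_cases hlt : s < n
      · exact RSReach.step s v ih hlt hvm hv0 hle
      · have : v = 0 := by omega
        subst this
        simpa using ih
  · intro h
    induction h with
    | zero => exact BRReach.zero
    | step s v hs hsi hvm hv0 hle ih =>
      exact BRReach.step s v ih hvm (by have := RSReach_nonneg n arr n s hs; omega) hle

-- ===== A-side lemmas =====

theorem pv_set_true_self (xs : List Bool) (k : Nat) (h : xs[k]? = some true) :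
    xs.set k true = xs := by
  apply List.ext_getElem?
  intro j
  rw [List.getElem?_set]
  split_ifs with h1 h2
  · subst h1; exact h.symm
  · subst h1; exact absurd (List.getElem?_eq_some_iff.mp h).1 h2
  · rfl

theorem pv_innerFold_false (i : Int) (arr : List Int) (xs : List Bool)
    (h : PySem.List.pyGetD xs i false = false) :
    arr.foldl (sunTabStep i) xs = xs := by
  induction arr with
  | nil => rfl
  | cons v rest ih =>
    rw [List.foldl_cons]
    have hs : sunTabStep i xs v = xs := by
      unfold sunTabStep
      rw [if_neg (by simp [h])]
    rw [hs]; exact ih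

theorem pv_innerFold_true (n i : Int) (arr : List Int) (xs : List Bool)
    (hn : 0 ≤ n) (h0 : 0 ≤ i) (hile : i ≤ n)
    (hlen : xs.length = (n + 1).toNat)
    (hi : xs[i.toNat]? = some true)
    (hv : ∀ v ∈ arr, 0 ≤ v ∨ v = -(n + 1)) :
    (arr.foldl (sunTabStep i) xs).length = xs.length ∧
      ∀ k : Nat, ((arr.foldl (sunTabStep i) xs)[k]? = some true ↔
        xs[k]? = some true ∨ ∃ v ∈ arr, 0 ≤ v ∧ (k : Int) = i + v ∧ (k : Int) ≤ n) := by
  induction arr generalizing xs with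
  | nil => simp
  | cons v rest ih =>
    have hvs := hv v (by simp)
    have hlenI : (xs.length : Int) = n + 1 := by omega
    have hguard : PySem.List.pyGetD xs i false = true := by
      rw [PySem.List.pyGetD_eq_getElem xs false h0 (by omega)]
      obtain ⟨hlt, hval⟩ := List.getElem?_eq_some_iff.mp hi
      exact hval
    have key : ∀ k : Nat, ((sunTabStep i xs v)[k]? = some true ↔
        (xs[k]? = some true ∨ (0 ≤ v ∧ (k : Int) = i + v ∧ (k : Int) ≤ n))) ∧
        (sunTabStep i xs v).length = xs.length := by
      rcases hvs with hv0 | hneg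
      · by_cases hb : i + v ≤ n
        · have hstep : sunTabStep i xs v = xs.set (i + v).toNat true := by
            unfold sunTabStep
            rw [if_pos (by simp [hguard]), if_pos (by simp only [PySem.List.len_eq]; omega),
              PySem.List.pySetD_of_nonneg xs true (by omega)]
          intro k
          refine ⟨?_, by rw [hstep, List.length_set]⟩
          rw [hstep, List.getElem?_set]
          split_ifs with he hlt
          · constructor
            · intro _; exact Or.inr ⟨hv0, by omega, by omega⟩
            · intro _; rfl
          · exact absurd (by omega : (i + v).toNat < xs.length) hlt
          · constructor
            · exact Or.inl
            · rintro (h | ⟨_, h2, _⟩)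
              · exact h
              · exact absurd (by omega : (i + v).toNat = k) he
        · have hstep : sunTabStep i xs v = xs := by
            unfold sunTabStep
            rw [if_pos (by simp [hguard]), if_neg (by simp only [PySem.List.len_eq]; omega)]
          intro k
          refine ⟨?_, by rw [hstep]⟩
          rw [hstep]
          constructor
          · exact Or.inl
          · rintro (h | ⟨_, h2, h3⟩)
            · exact h
            · omega
      · have hstep : sunTabStep i xs v = xs := by
          unfold sunTabStep
          rw [if_pos (by simp [hguard]), if_pos (by simp only [PySem.List.len_eq]; omega)]
          unfold PySem.List.pySetD PySem.List.pySet? PySem.List.pyIdx?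
          rw [if_neg (by omega), if_pos (by omega)]
          simp only [Option.map_some, Option.getD_some]
          rw [(by omega : xs.length - (-(i + v)).toNat = i.toNat)]
          exact pv_set_true_self xs i.toNat hi
        intro k
        refine ⟨?_, by rw [hstep]⟩
        rw [hstep]
        constructor
        · exact Or.inl
        · rintro (h | ⟨h1, _, _⟩)
          · exact h
          · omega
    have klen : (sunTabStep i xs v).length = xs.length := (key 0).2
    have hi' : (sunTabStep i xs v)[i.toNat]? = some true := ((key i.toNat).1).mpr (Or.inl hi)
    obtain ⟨ihlen, ihiff⟩ := ih (sunTabStep i xs v) (by rw [klen, hlen]) hi'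
      (fun v' hv' => hv v' (by simp [hv']))
    constructor
    · rw [List.foldl_cons, ihlen, klen]
    · intro k
      rw [List.foldl_cons, ihiff k]
      have hk := (key k).1
      constructor
      · rintro (h | ⟨v', hv', hrest⟩)
        · rcases hk.mp h with h' | h'
          · exact Or.inl h'
          · exact Or.inr ⟨v, by simp, h'⟩
        · exact Or.inr ⟨v', by simp [hv'], hrest⟩
      · rintro (h | ⟨v', hv', hrest⟩)
        · exact Or.inl (hk.mpr (Or.inl h))
        · rcases List.mem_cons.mp hv' with rfl | hv''
          · exact Or.inl (hk.mpr (Or.inr hrest))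
          · exact Or.inr ⟨v', hv'', hrest⟩

-- the state of A's table after the first m outer iterations
def sunTabOuter (n : Int) (arr : List Int) (m : Int) : List Bool :=
  (PySem.List.pyRange 0 m 1).foldl (fun newArr i =>
    (PySem.List.pyRange 0 (PySem.List.len arr) 1).foldl
      (fun newArr j => sunTabStep i newArr (PySem.List.pyGetD arr j 0)) newArr)
    (PySem.List.pySetD (PySem.List.pyRepeat [false] (n + 1)) 0 true)

theorem pv_sunTab_eq_outer (n : Int) (arr : List Int) : sunTab n arr = sunTabOuter n arr n := rfl

theorem pv_outer_inv (n : Int) (arr : List Int) (hn : 0 ≤ n)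
    (hv : ∀ v ∈ arr, 0 ≤ v ∨ v = -(n + 1)) :
    ∀ m : Nat, (m : Int) ≤ n →
      (sunTabOuter n arr (m : Int)).length = (n + 1).toNat ∧
      ∀ k : Nat, ((sunTabOuter n arr (m : Int))[k]? = some true ↔ RSReach n arr (m : Int) (k : Int)) := by
  intro m
  induction m with
  | zero =>
    intro _
    simp only [Nat.cast_zero]
    have hinit : sunTabOuter n arr 0 = (List.replicate (n + 1).toNat false).set 0 true := by
      unfold sunTabOuter
      rw [show PySem.List.pyRange (0 : Int) (0 : Int) = ([] : List Int) from rfl, List.foldl_nil,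
        PySem.List.pyRepeat_singleton, PySem.List.pySetD_of_nonneg _ true (by omega)]
      rfl
    rw [hinit]
    constructor
    · rw [List.length_set, List.length_replicate]
    · intro k
      rw [List.getElem?_set, RSReach_zero_iff, List.length_replicate]
      split_ifs with he hlt
      · constructor
        · intro _; omega
        · intro _; rfl
      · exact absurd (by omega : 0 < (n + 1).toNat) hlt
      · rw [List.getElem?_replicate]
        constructor
        · intro h
          exact absurd h (by split_ifs <;> simp)
        · intro h; exact absurd (by omega : (0 : Nat) = k) he
  | succ m ih =>
    intro hle
    have hm : (m : Int) ≤ n := by push_cast at hle ⊢; omega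
    obtain ⟨ihlen, ihiff⟩ := ih hm
    have hsplit : sunTabOuter n arr ((m + 1 : Nat) : Int) =
        arr.foldl (sunTabStep (m : Int)) (sunTabOuter n arr (m : Int)) := by
      unfold sunTabOuter
      rw [(by push_cast; ring : ((m + 1 : Nat) : Int) = (m : Int) + 1),
        PySem.List.pyRange_one_succ_right (by omega), List.foldl_append]
      simp only [List.foldl_cons, List.foldl_nil, PySem.List.len_eq]
      exact PySem.List.foldl_pyRange_zero_pyGetD' arr 0 (sunTabStep (m : Int)) _
    rw [hsplit]
    have hmlt : (m : Int) < n := by push_cast at hle; omega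
    by_cases hmm : (sunTabOuter n arr (m : Int))[(m : Int).toNat]? = some true
    · obtain ⟨flen, fiff⟩ := pv_innerFold_true n (m : Int) arr (sunTabOuter n arr (m : Int))
        hn (by omega) (by omega) ihlen hmm hv
      refine ⟨by rw [flen, ihlen], ?_⟩
      intro k
      rw [fiff k, (by push_cast; ring : ((m + 1 : Nat) : Int) = (m : Int) + 1),
        RSReach_succ_iff n arr (m : Int) (k : Int) (by omega)]
      have hRmm : RSReach n arr (m : Int) (m : Int) := by
        have := (ihiff (m : Int).toNat).mp (by simpa using hmm)
        simpa using this
      constructor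
      · rintro (h | ⟨v', hv', h1, h2, h3⟩)
        · exact Or.inl ((ihiff k).mp h)
        · exact Or.inr ⟨hRmm, v', hv', h1, h2, h3⟩
      · rintro (h | ⟨_, v', hv', h1, h2, h3⟩)
        · exact Or.inl ((ihiff k).mpr h)
        · exact Or.inr ⟨v', hv', h1, h2, h3⟩
    · have hlt : (m : Int).toNat < (sunTabOuter n arr (m : Int)).length := by
        rw [ihlen]; omega
      have hmf : (sunTabOuter n arr (m : Int))[(m : Int).toNat]? = some false := by
        have heq := List.getElem?_eq_getElem hlt
        cases hbv : (sunTabOuter n arr (m : Int))[(m : Int).toNat] with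
        | true => exact absurd (by rw [heq, hbv]) hmm
        | false => rw [heq, hbv]
      have hfold : arr.foldl (sunTabStep (m : Int)) (sunTabOuter n arr (m : Int)) =
          sunTabOuter n arr (m : Int) := by
        apply pv_innerFold_false
        rw [PySem.List.pyGetD_eq_getElem _ false (by omega) (by rw [ihlen]; omega)]
        exact (List.getElem?_eq_some_iff.mp hmf).2
      rw [hfold]
      refine ⟨ihlen, ?_⟩
      intro k
      rw [ihiff k, (by push_cast; ring : ((m + 1 : Nat) : Int) = (m : Int) + 1),
        RSReach_succ_iff n arr (m : Int) (k : Int) (by omega)]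
      have hnR : ¬ RSReach n arr (m : Int) (m : Int) := by
        intro hR
        exact hmm ((ihiff (m : Int).toNat).mpr (by simpa using hR))
      constructor
      · exact Or.inl
      · rintro (h | ⟨h1, _⟩)
        · exact h
        · exact absurd h1 hnR

theorem pv_A_char (n : Int) (arr : List Int) (hn : 0 ≤ n)
    (hv : ∀ v ∈ arr, 0 ≤ v ∨ v = -(n + 1)) :
    (sunTab n arr).length = (n + 1).toNat ∧
      ∀ k : Nat, ((sunTab n arr)[k]? = some true ↔ BRReach n arr (k : Int)) := by
  have hcast : ((n.toNat : Nat) : Int) = n := by omega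
  obtain ⟨hlen, hiff⟩ := pv_outer_inv n arr hn hv n.toNat (by omega)
  rw [hcast] at hlen hiff
  rw [pv_sunTab_eq_outer]
  refine ⟨hlen, ?_⟩
  intro k
  rw [hiff k, BRReach_iff_RSReach n arr (k : Int) hn hv]

-- ===== B-side lemmas =====

theorem pv_contains_false_iff (s : List Int) (t : Int) :
    PySem.Set.contains s t = false ↔ t ∉ s := by
  simp [PySem.Set.contains]

theorem pv_contains_true_iff (s : List Int) (t : Int) :
    PySem.Set.contains s t = true ↔ t ∈ s := by
  simp [PySem.Set.contains]

theorem pv_altBody_fold (n : Int) (arr : List Int) (s : Int) (hBRs : BRReach n arr s)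
    (l : List Int) :
    ∀ st : PySem.Set Int × List Int, st.1.Nodup → (∀ x ∈ st.1, BRReach n arr x) →
      (∀ v ∈ l, v ∈ arr) →
      ∃ app : List Int,
        (l.foldl (fun st v => sunTabAltBody n st s v) st).1 = st.1 ++ app ∧
        (l.foldl (fun st v => sunTabAltBody n st s v) st).2 = st.2 ++ app ∧
        (l.foldl (fun st v => sunTabAltBody n st s v) st).1.Nodup ∧
        (∀ x ∈ (l.foldl (fun st v => sunTabAltBody n st s v) st).1, BRReach n arr x) ∧
        (∀ v ∈ l, 0 ≤ s + v → s + v ≤ n →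
          s + v ∈ (l.foldl (fun st v => sunTabAltBody n st s v) st).1) := by
  induction l with
  | nil =>
    intro st h1 h2 _
    exact ⟨[], by simp, by simp, h1, h2, by simp⟩
  | cons v rest ih =>
    intro st h1 h2 hsub
    by_cases hc : 0 ≤ s + v ∧ s + v ≤ n ∧ PySem.Set.contains st.1 (s + v) = false
    · have hnotmem : s + v ∉ st.1 := (pv_contains_false_iff _ _).mp hc.2.2
      have hb : sunTabAltBody n st s v = (st.1 ++ [s + v], st.2 ++ [s + v]) := by
        unfold sunTabAltBody
        rw [if_pos hc]
        have hadd : PySem.Set.add st.1 (s + v) = st.1 ++ [s + v] := by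
          simp [PySem.Set.add, PySem.Set.contains, hnotmem]
        rw [hadd]
      have hBRt : BRReach n arr (s + v) := BRReach.step s v hBRs (hsub v (by simp)) hc.1 hc.2.1
      have h1' : (st.1 ++ [s + v]).Nodup := by
        simp [List.nodup_append, h1]
        intro a ha hq; exact hnotmem (hq ▸ ha)
      have h2' : ∀ x ∈ st.1 ++ [s + v], BRReach n arr x := by
        intro x hx
        rcases List.mem_append.mp hx with hx | hx
        · exact h2 x hx
        · rw [List.mem_singleton.mp hx]; exact hBRt
      obtain ⟨app, e1, e2, hnd, hbr, hmem⟩ := ih (st.1 ++ [s + v], st.2 ++ [s + v]) h1' h2'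
        (fun v' hv' => hsub v' (by simp [hv']))
      refine ⟨(s + v) :: app, ?_, ?_, ?_, ?_, ?_⟩
      · rw [List.foldl_cons, hb, e1]; simp
      · rw [List.foldl_cons, hb, e2]; simp
      · rw [List.foldl_cons, hb]; exact hnd
      · rw [List.foldl_cons, hb]; exact hbr
      · intro v' hv' hge hle
        rcases List.mem_cons.mp hv' with rfl | hv''
        · rw [List.foldl_cons, hb, e1]; simp
        · rw [List.foldl_cons, hb]; exact hmem v' hv'' hge hle
    · have hb : sunTabAltBody n st s v = st := by unfold sunTabAltBody; rw [if_neg hc]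
      obtain ⟨app, e1, e2, hnd, hbr, hmem⟩ := ih st h1 h2 (fun v' hv' => hsub v' (by simp [hv']))
      refine ⟨app, by rw [List.foldl_cons, hb]; exact e1, by rw [List.foldl_cons, hb]; exact e2,
        by rw [List.foldl_cons, hb]; exact hnd, by rw [List.foldl_cons, hb]; exact hbr, ?_⟩
      intro v' hv' hge hle
      rcases List.mem_cons.mp hv' with rfl | hv''
      · have hin : s + v' ∈ st.1 := by
          by_contra hni
          exact hc ⟨hge, hle, (pv_contains_false_iff _ _).mpr hni⟩
        rw [List.foldl_cons, hb, e1]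
        exact List.mem_append.mpr (Or.inl hin)
      · rw [List.foldl_cons, hb]; exact hmem v' hv'' hge hle

theorem pv_round_fold (n : Int) (arr : List Int) (fr : List Int) :
    ∀ st : PySem.Set Int × List Int, st.1.Nodup → (∀ x ∈ st.1, BRReach n arr x) →
      (∀ x ∈ fr, BRReach n arr x) →
      ∃ app : List Int,
        (fr.foldl (sunTabAltRound n arr) st).1 = st.1 ++ app ∧
        (fr.foldl (sunTabAltRound n arr) st).2 = st.2 ++ app ∧
        (fr.foldl (sunTabAltRound n arr) st).1.Nodup ∧
        (∀ x ∈ (fr.foldl (sunTabAltRound n arr) st).1, BRReach n arr x) ∧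
        (∀ s ∈ fr, ∀ v ∈ arr, 0 ≤ s + v → s + v ≤ n →
          s + v ∈ (fr.foldl (sunTabAltRound n arr) st).1) := by
  induction fr with
  | nil =>
    intro st h1 h2 _
    exact ⟨[], by simp, by simp, h1, h2, by simp⟩
  | cons s rest ih =>
    intro st h1 h2 hfr
    have hround : sunTabAltRound n arr st s = arr.foldl (fun st v => sunTabAltBody n st s v) st := rfl
    obtain ⟨app1, e1, e2, hnd1, hbr1, hmem1⟩ := pv_altBody_fold n arr s (hfr s (by simp)) arr st h1 h2
      (fun v hv => hv)
    obtain ⟨app2, f1, f2, hnd2, hbr2, hmem2⟩ := ih (arr.foldl (fun st v => sunTabAltBody n st s v) st)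
      hnd1 hbr1 (fun x hx => hfr x (by simp [hx]))
    refine ⟨app1 ++ app2, ?_, ?_, ?_, ?_, ?_⟩
    · rw [List.foldl_cons, hround, f1, e1, List.append_assoc]
    · rw [List.foldl_cons, hround, f2, e2, List.append_assoc]
    · rw [List.foldl_cons, hround]; exact hnd2
    · rw [List.foldl_cons, hround]; exact hbr2
    · intro s' hs' v hv hge hle
      rcases List.mem_cons.mp hs' with rfl | hs''
      · rw [List.foldl_cons, hround, f1]
        exact List.mem_append.mpr (Or.inl (hmem1 v hv hge hle))
      · rw [List.foldl_cons, hround]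
        exact hmem2 s' hs'' v hv hge hle

theorem pv_loop_spec (n : Int) (arr : List Int) :
    ∀ (fuel : Nat) (reach : PySem.Set Int) (frontier : List Int),
      reach.Nodup → (∀ x ∈ reach, BRReach n arr x) → (0 : Int) ∈ reach →
      (∀ x ∈ frontier, x ∈ reach) →
      (∀ s ∈ reach, s ∉ frontier → ∀ v ∈ arr, 0 ≤ s + v → s + v ≤ n → s + v ∈ reach) →
      (sunTabAltLoop n arr fuel reach frontier).Nodup ∧
      (∀ x ∈ sunTabAltLoop n arr fuel reach frontier, BRReach n arr x) ∧
      (0 : Int) ∈ sunTabAltLoop n arr fuel reach frontier ∧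
      ((∀ s ∈ sunTabAltLoop n arr fuel reach frontier, ∀ v ∈ arr, 0 ≤ s + v → s + v ≤ n →
          s + v ∈ sunTabAltLoop n arr fuel reach frontier) ∨
        (frontier ≠ [] ∧ reach.length + fuel ≤ (sunTabAltLoop n arr fuel reach frontier).length)) := by
  intro fuel
  induction fuel with
  | zero =>
    intro reach frontier h1 h2 h3 h4 h5
    simp only [sunTabAltLoop]
    by_cases hf : frontier = []
    · subst hf
      exact ⟨h1, h2, h3, Or.inl (fun s hs v hv hge hle => h5 s hs (by simp) v hv hge hle)⟩
    · exact ⟨h1, h2, h3, Or.inr ⟨hf, by omega⟩⟩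
  | succ fuel ih =>
    intro reach frontier h1 h2 h3 h4 h5
    by_cases hf : frontier = []
    · subst hf
      simp only [sunTabAltLoop]
      exact ⟨h1, h2, h3, Or.inl (fun s hs v hv hge hle => h5 s hs (by simp) v hv hge hle)⟩
    · have hstep : sunTabAltLoop n arr (fuel + 1) reach frontier =
          sunTabAltLoop n arr fuel (frontier.foldl (sunTabAltRound n arr) (reach, [])).1
            (frontier.foldl (sunTabAltRound n arr) (reach, [])).2 := by
        simp only [sunTabAltLoop, if_neg hf]
      obtain ⟨app, e1, e2, hnd, hbr, hproc⟩ := pv_round_fold n arr frontier (reach, []) h1 h2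
        (fun x hx => h2 x (h4 x hx))
      simp only [List.nil_append] at e2
      have hI4 : ∀ s ∈ (frontier.foldl (sunTabAltRound n arr) (reach, [])).1,
          s ∉ (frontier.foldl (sunTabAltRound n arr) (reach, [])).2 →
          ∀ v ∈ arr, 0 ≤ s + v → s + v ≤ n →
          s + v ∈ (frontier.foldl (sunTabAltRound n arr) (reach, [])).1 := by
        intro s hs hns v hv hge hle
        rw [e1] at hs
        rcases List.mem_append.mp hs with hs' | hs'
        · by_cases hsf : s ∈ frontier
          · exact hproc s hsf v hv hge hle
          · rw [e1]
            exact List.mem_append.mpr (Or.inl (h5 s hs' hsf v hv hge hle))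
        · exact absurd (e2 ▸ hs') hns
      obtain ⟨c1, c2, c3, c4⟩ := ih (frontier.foldl (sunTabAltRound n arr) (reach, [])).1
        (frontier.foldl (sunTabAltRound n arr) (reach, [])).2 hnd hbr
        (by rw [e1]; exact List.mem_append.mpr (Or.inl h3))
        (by intro x hx; rw [e1]; exact List.mem_append.mpr (Or.inr (e2 ▸ hx)))
        hI4
      rw [hstep]
      refine ⟨c1, c2, c3, ?_⟩
      rcases c4 with hcl | ⟨hne, hlen⟩
      · exact Or.inl hcl
      · refine Or.inr ⟨hf, ?_⟩
        have happ : app ≠ [] := by rw [← e2]; exact hne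
        have hlen1 : (frontier.foldl (sunTabAltRound n arr) (reach, [])).1.length =
            reach.length + app.length := by rw [e1, List.length_append]
        have : 1 ≤ app.length := List.length_pos_iff.mpr happ
        omega

theorem pv_B_char (n : Int) (arr : List Int) (hn : 0 ≤ n) (k : Int) :
    k ∈ sunTabAltLoop n arr n.toNat (PySem.Set.ofList [0]) [0] ↔ BRReach n arr k := by
  have hof : PySem.Set.ofList [(0 : Int)] = [0] := rfl
  rw [hof]
  obtain ⟨hnd, hbr, h0m, hcl⟩ := pv_loop_spec n arr n.toNat [0] [0]
    (by simp)
    (by intro x hx; rw [List.mem_singleton.mp hx]; exact BRReach.zero)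
    (by simp)
    (fun x hx => hx)
    (fun s hs hns v hv hge hle => absurd hs hns)
  constructor
  · exact hbr k
  · intro hk
    rcases hcl with hclosed | ⟨_, hlen⟩
    · induction hk with
      | zero => exact h0m
      | step s v hs hv hge hle ihk => exact hclosed s ihk v hv hge hle
    · have hsub2 : (sunTabAltLoop n arr n.toNat [0] [0]).toFinset ⊆ Finset.Icc 0 n := by
        intro x hx
        exact Finset.mem_Icc.mpr
          (BRReach_bounds n arr x hn (hbr x (List.mem_toFinset.mp hx)))
      have hcard : (sunTabAltLoop n arr n.toNat [0] [0]).toFinset.card =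
          (sunTabAltLoop n arr n.toNat [0] [0]).length := List.toFinset_card_of_nodup hnd
      have heq : (sunTabAltLoop n arr n.toNat [0] [0]).toFinset = Finset.Icc 0 n := by
        apply Finset.eq_of_subset_of_card_le hsub2
        rw [Int.card_Icc, hcard]
        simp only [List.length_singleton] at hlen
        omega
      have hkin : k ∈ Finset.Icc (0 : Int) n :=
        Finset.mem_Icc.mpr (BRReach_bounds n arr k hn hk)
      exact List.mem_toFinset.mp (heq ▸ hkin)

-- ===== assembly =====

theorem pv_zero (arr : List Int) : sunTab 0 arr = sunTab_alt 0 arr := rfl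

theorem pv_main (n : Int) (arr : List Int) (hn : 0 ≤ n)
    (hv : ∀ v ∈ arr, 0 ≤ v ∨ v = -(n + 1)) : sunTab n arr = sunTab_alt n arr := by
  obtain ⟨hlenA, hiffA⟩ := pv_A_char n arr hn hv
  apply List.ext_getElem?
  intro k
  have hAlt : sunTab_alt n arr = (PySem.List.pyRange 0 (n + 1)).map
      (fun i => PySem.Set.contains (sunTabAltLoop n arr n.toNat (PySem.Set.ofList [0]) [0]) i) := rfl
  have hRHS : (sunTab_alt n arr)[k]? = if k < (n + 1 - 0).toNat then
      some (PySem.Set.contains (sunTabAltLoop n arr n.toNat (PySem.Set.ofList [0]) [0]) (0 + (k : Int)))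
      else none := by
    rw [hAlt, List.getElem?_map, PySem.List.getElem?_pyRange_one]
    split_ifs with hk
    · rfl
    · rfl
  rw [hRHS]
  by_cases hk : k < (n + 1).toNat
  · rw [if_pos (by omega)]
    have hklt : k < (sunTab n arr).length := by omega
    rw [List.getElem?_eq_getElem hklt]
    by_cases hbr : BRReach n arr (k : Int)
    · have hA : (sunTab n arr)[k] = true := by
        have := (hiffA k).mpr hbr
        rw [List.getElem?_eq_getElem hklt] at this
        exact Option.some_injective _ this
      have hB : PySem.Set.contains (sunTabAltLoop n arr n.toNat (PySem.Set.ofList [0]) [0])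
          (0 + (k : Int)) = true := by
        rw [pv_contains_true_iff]
        rw [(by omega : (0 : Int) + (k : Int) = (k : Int))]
        exact (pv_B_char n arr hn (k : Int)).mpr hbr
      rw [hA, hB]
    · have hA : (sunTab n arr)[k] = false := by
        cases hbv : (sunTab n arr)[k] with
        | true =>
          exact absurd ((hiffA k).mp (by rw [List.getElem?_eq_getElem hklt, hbv])) hbr
        | false => rfl
      have hB : PySem.Set.contains (sunTabAltLoop n arr n.toNat (PySem.Set.ofList [0]) [0])
          (0 + (k : Int)) = false := by
        rw [pv_contains_false_iff]
        rw [(by omega : (0 : Int) + (k : Int) = (k : Int))]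
        intro hm
        exact hbr ((pv_B_char n arr hn (k : Int)).mp hm)
      rw [hA, hB]
  · rw [if_neg (by omega)]
    exact List.getElem?_eq_none (by omega)

theorem sunTab_spec : Claim_unchanged_sunTab := by
  intro n arr _ hpre hnd
  rcases hpre with ⟨hn, hrest⟩
  rcases eq_or_lt_of_le hn with heq | hpos
  · cases heq; exact pv_zero arr
  · have hvv : ∀ v ∈ arr, 0 ≤ v ∨ v = -(n + 1) := by
      intro v hv
      have h1 : -(n + 1) ≤ v := by
        rcases hrest with h | h
        · omega
        · exact h v hv
      by_cases hneg : 0 ≤ v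
      · exact Or.inl hneg
      · right
        unfold D_sunTab at hnd
        by_contra hne
        exact hnd ⟨by omega, v, hv, by omega, by omega⟩
    exact pv_main n arr hn hvv

theorem sunTab_changed : Claim_changed_sunTab := by
  unfold Claim_changed_sunTab; decide
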